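-- pv_equiv track=rewrite | github.com/ValeriiRuchko/Lab1Algo | task_one.py | sorting_task_a
-- ===== SOURCE A (Python) =====
-- import math
--
-- startingSize = 11
--
-- def sorting_task_a(arr):
--     operatedArr = [0] * startingSize
--     if startingSize%2 == 0:
--         middleOne = math.floor(startingSize/2)-1
--         middleTwo = math.floor(startingSize/2)
--         operatedArr[middleTwo] = arr[0]  # because it's sorted in ascending order
--         operatedArr[middleOne] = arr[1]
--         i = 1
--         operatedArr[middleOne - i] = arr[2]
--         i = 4
--         r = range(2, (middleOne+1))
--         #  left side
--         for x in r:
--             operatedArr[middleOne - x] = arr[i]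
--             i += 2
--         # right side
--         m = range(1, (middleOne+1))
--         i = 3
--         for x in m:
--             operatedArr[middleTwo + x] = arr[i]
--             i += 2
--     else:
--         middle = math.floor(startingSize/2)  # center = arr.length/2
--         operatedArr[middle] = arr[0]  # our array is sorted in descendant order - look there
--         # sorting
--         i = 1
--         operatedArr[middle - i] = arr[i]
--         i = 3
--         r = 1
--         # left side
--         while r < middle:
--             r += 1
--             operatedArr[middle - r] = arr[i]
--             i += 2
--         i = 2
--         r = 1
--         # right side
--         while r <= middle:
--             operatedArr[middle + r] = arr[i]
--             r += 1
--             i += 2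
--     return operatedArr
-- ===== SOURCE B (Python) =====
-- def sorting_task_a(arr):
--     result = [0] * 11
--     for j in range(11):
--         dest = 5 if j == 0 else (5 - (j + 1) // 2 if j % 2 else 5 + j // 2)
--         result[dest] = arr[j]
--     return result
-- ===== Notes on version B (the rewrite author's own statement) =====
-- stated objective: simpler
-- what changed: Replaces A's dead even-branch plus two directional while-loops with counter variables by a single forward pass over source indices j in range(11), placing each arr[j] at a computed destination index.
import Mathlib
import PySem

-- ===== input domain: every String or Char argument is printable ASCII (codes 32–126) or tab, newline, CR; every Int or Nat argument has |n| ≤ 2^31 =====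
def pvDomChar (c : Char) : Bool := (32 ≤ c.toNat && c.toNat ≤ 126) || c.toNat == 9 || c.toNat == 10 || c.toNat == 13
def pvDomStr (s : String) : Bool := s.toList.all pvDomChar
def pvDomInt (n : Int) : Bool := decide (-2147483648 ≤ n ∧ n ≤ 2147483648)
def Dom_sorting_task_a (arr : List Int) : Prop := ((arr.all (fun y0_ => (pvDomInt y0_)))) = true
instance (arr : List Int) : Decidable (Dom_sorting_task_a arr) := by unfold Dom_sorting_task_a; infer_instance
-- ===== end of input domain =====

-- B replaces A's two directional while-loops with counter state by one forward pass placing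
-- each arr[j] at a computed destination (objective: simpler). Return-value equivalence;
-- neither program mutates its argument.

-- ===== PORT A =====
-- arr[i] read; Pre_ guarantees 0 ≤ i < len(arr), so the getD 0 default is never taken on admitted inputs
def pvGetA (arr : List Int) (i : Int) : Int := (PySem.List.pyGet? arr i).getD 0

-- 'while r < middle: r += 1; operatedArr[middle-r] = arr[i]; i += 2'
-- write index middle - (r+1) is ≥ 0 throughout the loop, so .toNat is exact here
def pvLeftLoop (arr : List Int) (middle : Int) (op : List Int) (i r : Int) : List Int :=
  if _h : r < middle then
    pvLeftLoop arr middle ((op.set (middle - (r + 1)).toNat (pvGetA arr i))) (i + 2) (r + 1)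
  else op
termination_by (middle - r).toNat
decreasing_by omega

-- 'while r <= middle: operatedArr[middle+r] = arr[i]; r += 1; i += 2'
def pvRightLoop (arr : List Int) (middle : Int) (op : List Int) (i r : Int) : List Int :=
  if _h : r ≤ middle then
    pvRightLoop arr middle ((op.set (middle + r).toNat (pvGetA arr i))) (i + 2) (r + 1)
  else op
termination_by (middle + 1 - r).toNat
decreasing_by omega

-- the even branch of A is dead code for startingSize = 11 but is transliterated all the same
def pvEvenBranch (arr : List Int) (operatedArr : List Int) : List Int :=
  let middleOne := PySem.Int.floordiv 11 2 - 1
  let middleTwo := PySem.Int.floordiv 11 2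
  let op := operatedArr.set middleTwo.toNat (pvGetA arr 0)
  let op := op.set middleOne.toNat (pvGetA arr 1)
  let i : Int := 1
  let op := op.set (middleOne - i).toNat (pvGetA arr 2)
  -- 'for x in range(2, middleOne+1)' left side, then 'for x in range(1, middleOne+1)' right side
  let st := (PySem.List.pyRange 2 (middleOne + 1) 1).foldl
    (fun (st : List Int × Int) x => (st.1.set (middleOne - x).toNat (pvGetA arr st.2), st.2 + 2)) (op, 4)
  let st2 := (PySem.List.pyRange 1 (middleOne + 1) 1).foldl
    (fun (st : List Int × Int) x => (st.1.set (middleTwo + x).toNat (pvGetA arr st.2), st.2 + 2)) (st.1, 3)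
  st2.1

def sorting_task_a (arr : List Int) : List Int :=
  let operatedArr := List.replicate 11 (0 : Int)
  if PySem.Int.mod 11 2 == 0 then
    pvEvenBranch arr operatedArr
  else
    let middle := PySem.Int.floordiv 11 2
    let op := operatedArr.set middle.toNat (pvGetA arr 0)
    let i : Int := 1
    let op := op.set (middle - i).toNat (pvGetA arr i)
    let op := pvLeftLoop arr middle op 3 1
    pvRightLoop arr middle op 2 1

-- ===== PORT B =====
-- single pass: for j in range(11): result[dest(j)] = arr[j]
def sorting_task_a_alt (arr : List Int) : List Int :=
  (PySem.List.pyRange 0 11 1).foldl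
    (fun (result : List Int) j =>
      let dest : Int :=
        if j == 0 then 5
        else if PySem.Int.mod j 2 != 0 then 5 - PySem.Int.floordiv (j + 1) 2
        else 5 + PySem.Int.floordiv j 2
      result.set dest.toNat (pvGetA arr j))
    (List.replicate 11 (0 : Int))

-- ===== PRECONDITION & SPEC =====
-- Pre_: arrays with fewer than 11 elements make both Pythons raise IndexError
def Pre_sorting_task_a (arr : List Int) : Prop := 11 ≤ arr.length
instance (arr : List Int) : Decidable (Pre_sorting_task_a arr) := by unfold Pre_sorting_task_a; infer_instance
def pvWitness_sorting_task_a : List Int := [1, 2, 3, 4, 5, 6, 7, 8, 9, 10, 11]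

def Spec_sorting_task_a (arr : List Int) (out : List Int) : Prop := out = sorting_task_a_alt arr
instance (arr : List Int) (out : List Int) : Decidable (Spec_sorting_task_a arr out) := by unfold Spec_sorting_task_a; infer_instance

-- ===== CLAIM (what is proved, stated in full; the proofs are below) =====
def Claim_equal_sorting_task_a : Prop := ∀ (arr : List Int), Dom_sorting_task_a arr → Pre_sorting_task_a arr → Spec_sorting_task_a arr (sorting_task_a arr)

-- ===== LEMMAS AND PROOFS =====

-- both programs read only arr[0..10]; with the 11 heads exposed everything reduces by computation
lemma both_eq_on_cons (a0 a1 a2 a3 a4 a5 a6 a7 a8 a9 a10 : Int) (rest : List Int) :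
    sorting_task_a (a0::a1::a2::a3::a4::a5::a6::a7::a8::a9::a10::rest)
      = sorting_task_a_alt (a0::a1::a2::a3::a4::a5::a6::a7::a8::a9::a10::rest) := by
  simp [sorting_task_a, sorting_task_a_alt, pvLeftLoop, pvRightLoop, pvGetA,
        PySem.Int.mod, PySem.Int.floordiv, PySem.List.pyGet?_of_nonneg,
        PySem.List.pyRange, List.range_succ]

-- ===== VERDICT (by name: the statement is the Claim_ definition above) =====
theorem sorting_task_a_spec : Claim_equal_sorting_task_a := by
  intro arr _ hpre
  unfold Spec_sorting_task_a
  match arr, hpre with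
  | a0::a1::a2::a3::a4::a5::a6::a7::a8::a9::a10::rest, _ =>
    exact both_eq_on_cons a0 a1 a2 a3 a4 a5 a6 a7 a8 a9 a10 rest
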